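-- pv_equiv track=rewrite | github.com/dmoniz22/agent_orchestrator | backend/src/skills/library/calculator.py | _clean_expression
-- ===== SOURCE A (Python) =====
-- def _clean_expression(expression: str) -> str:
--     """Clean and prepare expression for evaluation.
--
--     Args:
--         expression: Raw expression.
--
--     Returns:
--         Cleaned expression.
--     """
--     # Remove whitespace
--     cleaned = expression.strip()
--
--     # Basic sanitization - only allow safe characters
--     allowed_chars = set('0123456789.+-*/()^% ')
--     allowed_chars.update('abcdefghijklmnopqrstuvwxyz_')
--     allowed_chars.update('ABCDEFGHIJKLMNOPQRSTUVWXYZ')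
--
--     # Check for dangerous characters
--     for char in cleaned:
--         if char not in allowed_chars:
--             raise ValueError(f"Invalid character in expression: {char}")
--
--     # Replace ^ with ** for exponentiation
--     cleaned = cleaned.replace('^', '**')
--
--     return cleaned
-- ===== SOURCE B (Python) =====
-- # Single fused pass: a lookup table both validates each character and yields its
-- # output piece ('^' -> '**', every other allowed char -> itself); the result is
-- # built incrementally, instead of A's validate-everything pass followed by a
-- # separate replace pass.
-- _TRANSLATION = {c: c for c in '0123456789.+-*/()% abcdefghijklmnopqrstuvwxyz_ABCDEFGHIJKLMNOPQRSTUVWXYZ'}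
-- _TRANSLATION['^'] = '**'
--
--
-- def _clean_expression(expression: str) -> str:
--     pieces = []
--     for char in expression.strip():
--         piece = _TRANSLATION.get(char)
--         if piece is None:
--             raise ValueError(f"Invalid character in expression: {char}")
--         pieces.append(piece)
--     return ''.join(pieces)
-- ===== Notes on version B (the rewrite author's own statement) =====
-- stated objective: alternative
-- what changed: B fuses A's two staged passes (validate every character, then str.replace '^'->'**') into one pass driven by a translation dict that simultaneously validates each character and emits its output piece, building the result incrementally.
-- outside the precondition, e.g. on _clean_expression('2+$3'): A raises ValueError, B raises ValueError
import Mathlib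
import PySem

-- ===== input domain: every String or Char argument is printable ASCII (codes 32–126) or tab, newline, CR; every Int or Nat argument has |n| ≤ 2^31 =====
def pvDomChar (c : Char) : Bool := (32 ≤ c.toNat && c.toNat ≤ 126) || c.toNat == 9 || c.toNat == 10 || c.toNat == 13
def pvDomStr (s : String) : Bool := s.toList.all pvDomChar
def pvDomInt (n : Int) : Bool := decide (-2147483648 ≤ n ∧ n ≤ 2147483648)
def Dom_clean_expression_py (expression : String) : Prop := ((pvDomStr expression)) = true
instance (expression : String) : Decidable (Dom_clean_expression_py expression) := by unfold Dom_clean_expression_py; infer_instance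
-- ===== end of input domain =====

-- B fuses A's two staged passes (validate all chars, then replace '^' by '**') into one
-- dict-driven pass that validates and emits simultaneously (objective: alternative).
-- Inputs where A raises ValueError are excluded by Pre_; B raises there too.

-- ===== PORT A =====
-- allowed_chars = set('0123456789.+-*/()^% '); .update(lowercase+'_'); .update(uppercase)
def pvAllowedA : PySem.Set Char :=
  PySem.Set.update
    (PySem.Set.update (PySem.Set.ofList "0123456789.+-*/()^% ".toList)
      "abcdefghijklmnopqrstuvwxyz_".toList)
    "ABCDEFGHIJKLMNOPQRSTUVWXYZ".toList

-- the 'for char in cleaned: if char not in allowed_chars: raise' loop;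
-- false = the loop raised ValueError (those inputs are outside Pre_)
def pvCheckA : List Char → Bool
  | [] => true
  | c :: cs => if PySem.Set.contains pvAllowedA c then pvCheckA cs else false

def clean_expression_py (expression : String) : String :=
  let cleaned := PySem.Str.strip expression
  if pvCheckA cleaned.toList then PySem.Str.replace cleaned "^" "**"
  else ""   -- raise ValueError: unreachable under Pre_

-- ===== PORT B =====
-- _TRANSLATION = {c: c for c in allowed-minus-'^'}; _TRANSLATION['^'] = '**'
def pvTransB : PySem.Dict Char String :=
  PySem.Dict.insert
    ("0123456789.+-*/()% abcdefghijklmnopqrstuvwxyz_ABCDEFGHIJKLMNOPQRSTUVWXYZ".toList.foldl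
      (fun d c => PySem.Dict.insert d c (String.ofList [c])) PySem.Dict.empty)
    '^' "**"

-- the 'for char in cleaned: piece = _TRANSLATION.get(char); …; pieces.append(piece)' loop;
-- none = the loop raised ValueError (those inputs are outside Pre_)
def pvPiecesB : List Char → Option (List String)
  | [] => some []
  | c :: cs =>
      (PySem.Dict.get? pvTransB c).bind (fun p => (pvPiecesB cs).map (p :: ·))

def clean_expression_py_alt (expression : String) : String :=
  let cleaned := PySem.Str.strip expression
  match pvPiecesB cleaned.toList with
  | some pieces => PySem.Str.join "" pieces
  | none => ""   -- raise ValueError: unreachable under Pre_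

-- ===== PRECONDITION & SPEC =====
-- Pre_ excludes exactly the inputs on which A raises ValueError (a character of the
-- stripped expression outside the allowed alphabet); B raises there too.
def pvAllowedPre : List Char :=
  "0123456789.+-*/()^% abcdefghijklmnopqrstuvwxyz_ABCDEFGHIJKLMNOPQRSTUVWXYZ".toList

def Pre_clean_expression_py (expression : String) : Prop :=
  ((PySem.Str.strip expression).toList.all (fun c => pvAllowedPre.contains c)) = true

instance (expression : String) : Decidable (Pre_clean_expression_py expression) := by
  unfold Pre_clean_expression_py; infer_instance

def pvWitness_clean_expression_py : String := " 2^x % 3 "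

def Spec_clean_expression_py (expression : String) (out : String) : Prop := out = clean_expression_py_alt expression
instance (expression : String) (out : String) : Decidable (Spec_clean_expression_py expression out) := by unfold Spec_clean_expression_py; infer_instance

-- ===== CLAIM (what is proved, stated in full; the proofs are below) =====
def Claim_equal_clean_expression_py : Prop := ∀ (expression : String), Dom_clean_expression_py expression → Pre_clean_expression_py expression → Spec_clean_expression_py expression (clean_expression_py expression)

-- ===== LEMMAS AND PROOFS =====

-- the common translation of one allowed character
def pvPiece (c : Char) : List Char := if c = '^' then ['*', '*'] else [c]

set_option maxRecDepth 8192 in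
lemma pvAllowedA_eq : pvAllowedA = pvAllowedPre := by decide

lemma pvCheckA_of_all (l : List Char) (h : l.all (fun c => pvAllowedPre.contains c) = true) :
    pvCheckA l = true := by
  induction l with
  | nil => rfl
  | cons c cs ih =>
      simp only [List.all_cons, Bool.and_eq_true] at h
      simp only [pvCheckA, pvAllowedA_eq, PySem.Set.contains, h.1, if_true]
      exact ih h.2

-- get? after the dict-comprehension fold: a plain membership test
lemma get?_foldl_insert (l : List Char) (d : PySem.Dict Char String) (c : Char) :
    (l.foldl (fun d c => PySem.Dict.insert d c (String.ofList [c])) d).get? c =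
      if c ∈ l then some (String.ofList [c]) else PySem.Dict.get? d c := by
  induction l generalizing d with
  | nil => simp
  | cons c0 t ih =>
      simp only [List.foldl_cons, ih, PySem.Dict.get?_insert, List.mem_cons]
      by_cases h1 : c ∈ t
      · simp [h1]
      · by_cases h2 : c = c0
        · subst h2; simp [h1]
        · simp [h1, h2]

def pvNoCaret : List Char :=
  "0123456789.+-*/()% abcdefghijklmnopqrstuvwxyz_ABCDEFGHIJKLMNOPQRSTUVWXYZ".toList

set_option maxRecDepth 4096 in
lemma erase_caret : pvAllowedPre.erase '^' = pvNoCaret := by decide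

lemma pvTransB_get?_of_mem (c : Char) (hc : c ∈ pvAllowedPre) :
    PySem.Dict.get? pvTransB c = some (String.ofList (pvPiece c)) := by
  unfold pvTransB
  rw [PySem.Dict.get?_insert]
  by_cases hne : c = '^'
  · subst hne; simp [pvPiece]
  · have h : c ∈ pvNoCaret := by
      rw [← erase_caret]; exact (List.mem_erase_of_ne hne).mpr hc
    have h' : c ∈ ("0123456789.+-*/()% abcdefghijklmnopqrstuvwxyz_ABCDEFGHIJKLMNOPQRSTUVWXYZ".toList) := h
    rw [if_neg hne, get?_foldl_insert, if_pos h']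
    simp [pvPiece, hne]

-- character-wise value of Chars.replace with the one-char pattern '^'
lemma replace_go_caret (l acc : List Char) :
    PySem.Chars.replace.go ['^'] ['*', '*'] l.length l acc
      = acc.reverse ++ l.flatMap pvPiece := by
  induction l generalizing acc with
  | nil => simp [PySem.Chars.replace.go]
  | cons c cs ih =>
      by_cases h : c = '^'
      · subst h
        simp [PySem.Chars.replace.go, List.isPrefixOf, pvPiece, ih]
      · have hp : List.isPrefixOf ['^'] (c :: cs) = false := by
          simp [List.isPrefixOf]; exact Ne.symm h
        simp [PySem.Chars.replace.go, hp, pvPiece, h, ih]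

lemma replace_caret (l : List Char) :
    PySem.Chars.replace l ['^'] ['*', '*'] = l.flatMap pvPiece := by
  simpa [PySem.Chars.replace] using replace_go_caret l []

lemma pvPiecesB_of_all (l : List Char)
    (h : l.all (fun c => pvAllowedPre.contains c) = true) :
    pvPiecesB l = some (l.map (fun c => String.ofList (pvPiece c))) := by
  induction l with
  | nil => rfl
  | cons c cs ih =>
      simp only [List.all_cons, Bool.and_eq_true] at h
      have hc : c ∈ pvAllowedPre := List.mem_of_elem_eq_true h.1
      rw [pvPiecesB, pvTransB_get?_of_mem c hc, ih h.2]
      rfl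

lemma join_nil_flatten (parts : List (List Char)) :
    PySem.Chars.join [] parts = parts.flatten := by
  induction parts with
  | nil => rfl
  | cons a t ih =>
      cases t with
      | nil => simp [PySem.Chars.join, List.intercalate]
      | cons b t2 =>
          simp only [PySem.Chars.join, List.intercalate] at ih ⊢
          simp [List.intersperse, ih]

-- ===== VERDICT (by name: the statement is the Claim_ definition above) =====
theorem clean_expression_py_spec : Claim_equal_clean_expression_py := by
  intro e _ hpre
  unfold Spec_clean_expression_py clean_expression_py clean_expression_py_alt
  simp only [pvCheckA_of_all _ hpre, pvPiecesB_of_all _ hpre, if_true]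
  apply String.toList_inj.mp
  rw [PySem.Str.toList_replace, PySem.Str.toList_join]
  have h0 : ("" : String).toList = ([] : List Char) := rfl
  have h1 : ("^" : String).toList = ['^'] := rfl
  have h2 : ("**" : String).toList = ['*', '*'] := rfl
  rw [h0, h1, h2, replace_caret, join_nil_flatten, List.map_map]
  simp [List.flatMap_def, Function.comp_def]
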